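-- pv_equiv track=rewrite | github.com/courtois-neuromod/friends.stimuli | language_annotations/friends_util.py | ngram_extractor
-- ===== SOURCE A (Python) =====
-- def ngram_extractor(text, n_gram, stop_words):
--     token = [
--         token
--         for token in text.lower().split(" ")
--         if token != ""
--         if token not in stop_words
--     ]
--     ngrams = zip(*[token[i:] for i in range(n_gram)])
--     return [" ".join(ngram) for ngram in ngrams]
-- ===== SOURCE B (Python) =====
-- def ngram_extractor(text, n_gram, stop_words):
--     token = [
--         token
--         for token in text.lower().split(" ")
--         if token != ""
--         if token not in stop_words
--     ]
--     if n_gram <= 0: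
--         return []
--     return [" ".join(token[i:i + n_gram]) for i in range(len(token) - n_gram + 1)]
-- ===== Notes on version B (the rewrite author's own statement) =====
-- stated objective: faster
-- what changed: Builds each n-gram by positional slicing of a sliding window (token[i:i+n_gram] over window start positions) instead of materializing n_gram offset copies of the suffix list and star-zipping them; the tokenizing filter is unchanged.
import Mathlib
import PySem

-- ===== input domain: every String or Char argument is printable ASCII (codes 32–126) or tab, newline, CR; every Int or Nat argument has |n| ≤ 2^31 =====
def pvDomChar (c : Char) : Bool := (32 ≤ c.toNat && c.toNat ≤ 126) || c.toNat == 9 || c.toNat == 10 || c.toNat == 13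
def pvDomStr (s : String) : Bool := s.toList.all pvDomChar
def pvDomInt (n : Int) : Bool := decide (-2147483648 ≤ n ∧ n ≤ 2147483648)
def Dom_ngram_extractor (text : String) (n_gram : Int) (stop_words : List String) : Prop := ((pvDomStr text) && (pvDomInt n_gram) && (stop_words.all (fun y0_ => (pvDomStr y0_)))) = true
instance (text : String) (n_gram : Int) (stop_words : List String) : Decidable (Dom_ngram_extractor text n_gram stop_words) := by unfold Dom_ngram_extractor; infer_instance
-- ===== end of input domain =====

-- B replaces A's star-zip of n_gram offset suffix lists by a positional sliding window
-- (one slice token[i:i+n_gram] per window start position); the tokenizing filter is unchanged.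

-- ===== PORT A =====

-- zip(*ls) for a list of lists, hand-ported (PySem offers only binary zip); exact for Python's
-- zip of finitely many lists: it yields the tuple of heads while every argument is nonempty
-- (zip() of an empty argument list yields nothing).
def pyZipStar (ls : List (List String)) : List (List String) :=
  if _h : ls.isEmpty || ls.any List.isEmpty then []
  else (ls.filterMap List.head?) :: pyZipStar (ls.map List.tail)
termination_by (ls.headD []).length
decreasing_by
  simp only [Bool.or_eq_true, List.isEmpty_iff, List.any_eq_true, not_or, not_exists, not_and] at _h
  obtain ⟨h1, h2⟩ := _h
  cases ls with
  | nil => exact absurd rfl h1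
  | cons a rest =>
    cases a with
    | nil => exact absurd rfl (h2 [] List.mem_cons_self)
    | cons b bs => simp

-- token = [t for t in text.lower().split(" ") if t != "" if t not in stop_words];
-- the separator is the literal nonempty string " ", so Python's split never raises and
-- PySem.Str.split? is `some` here (the .getD [] is unreachable).
def ngram_extractor (text : String) (n_gram : Int) (stop_words : List String) : List String :=
  let token := ((PySem.Str.split? (PySem.Str.lower text) " ").getD []).filter
    (fun t => t != "" && !(stop_words.contains t))
  let ngrams := pyZipStar ((PySem.List.pyRange 0 n_gram 1).map
    (fun i => PySem.List.slice token (some i) none))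
  ngrams.map (fun g => PySem.Str.join " " g)

-- ===== PORT B =====
def ngram_extractor_alt (text : String) (n_gram : Int) (stop_words : List String) : List String :=
  let token := ((PySem.Str.split? (PySem.Str.lower text) " ").getD []).filter
    (fun t => t != "" && !(stop_words.contains t))
  if n_gram ≤ 0 then []
  else (PySem.List.pyRange 0 ((token.length : Int) - n_gram + 1) 1).map
    (fun i => PySem.Str.join " " (PySem.List.slice token (some i) (some (i + n_gram))))

-- ===== PRECONDITION & SPEC =====
def Spec_ngram_extractor (text : String) (n_gram : Int) (stop_words : List String) (out : List String) : Prop := out = ngram_extractor_alt text n_gram stop_words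
instance (text : String) (n_gram : Int) (stop_words : List String) (out : List String) : Decidable (Spec_ngram_extractor text n_gram stop_words out) := by unfold Spec_ngram_extractor; infer_instance

-- ===== CLAIM (what is proved, stated in full; the proofs are below) =====
def Claim_equal_ngram_extractor : Prop := ∀ (text : String) (n_gram : Int) (stop_words : List String), Dom_ngram_extractor text n_gram stop_words → Spec_ngram_extractor text n_gram stop_words (ngram_extractor text n_gram stop_words)

-- ===== LEMMAS AND PROOFS =====

-- the common value of both window constructions: the successive length-n windows of t
def winds (n : Nat) : List String → List (List String)
  | [] => []
  | a :: t => if (a :: t).length < n then [] else (a :: t).take n :: winds n t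

-- the heads of the suffixes t, t[1:], …, t[n-1:] are the first n elements of t
theorem filterMap_head?_drops (t : List String) (n : Nat) :
    List.filterMap List.head? ((List.range n).map (fun i => t.drop i)) = t.take n := by
  induction n with
  | zero => simp
  | succ m ih =>
    rw [List.range_succ, List.map_append, List.filterMap_append, ih, List.take_add_one]
    cases hopt : t[m]? <;> simp [List.filterMap, List.head?_drop, hopt]

-- A's construction: zipping the n offset suffixes of t yields the length-n windows of t
theorem pyZipStar_drops (t : List String) (n : Nat) (hn : 1 ≤ n) :
    pyZipStar ((List.range n).map (fun i => t.drop i)) = winds n t := by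
  induction t with
  | nil =>
    rw [pyZipStar, winds]
    simp
  | cons a t ih =>
    by_cases hlen : (a :: t).length < n
    · rw [pyZipStar]
      have hd : (a :: t).drop (n - 1) = [] := by
        rw [List.drop_eq_nil_iff]
        simp only [List.length_cons] at hlen ⊢
        omega
      have h1 : ((List.range n).map (fun i => (a :: t).drop i)).any List.isEmpty = true := by
        simp only [List.any_eq_true, List.mem_map, List.mem_range]
        exact ⟨(a :: t).drop (n - 1), ⟨n - 1, by omega, rfl⟩, by rw [hd]; rfl⟩
      rw [winds, if_pos hlen]
      simp [h1]
    · rw [pyZipStar]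
      have hcond : (((List.range n).map (fun i => (a :: t).drop i)).isEmpty
          || ((List.range n).map (fun i => (a :: t).drop i)).any List.isEmpty) = false := by
        simp only [Bool.or_eq_false_iff, List.isEmpty_eq_false_iff, List.any_eq_false]
        refine ⟨by simp only [ne_eq, List.map_eq_nil_iff, List.range_eq_nil]; omega, ?_⟩
        intro x hx
        simp only [List.mem_map, List.mem_range] at hx
        obtain ⟨i, hi, rfl⟩ := hx
        rcases h' : (a :: t).drop i with _ | ⟨c, cs⟩
        · rw [List.drop_eq_nil_iff] at h'
          simp only [List.length_cons] at h' hlen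
          omega
        · simp
      rw [dif_neg (by rw [hcond]; simp)]
      have htails : ((List.range n).map (fun i => (a :: t).drop i)).map List.tail
          = (List.range n).map (fun i => t.drop i) := by
        simp only [List.map_map]
        exact List.map_congr_left (fun i _ => by
          simp only [Function.comp_apply, List.tail_drop, List.drop_succ_cons])
      rw [filterMap_head?_drops, htails, ih, winds, if_neg hlen]

-- B's construction: the window count many slices t[k:k+n] are the length-n windows of t
theorem slices_windows (t : List String) (n : Nat) (hn : 1 ≤ n) :
    (List.range (((t.length : Int) - (n : Int) + 1).toNat)).map
        (fun (k : Nat) => PySem.List.slice t (some ((k : Nat) : Int)) (some (((k : Nat) : Int) + (n : Int))))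
      = winds n t := by
  induction t with
  | nil =>
    have h0 : ((([] : List String).length : Int) - (n : Int) + 1).toNat = 0 := by
      simp only [List.length_nil, Int.natCast_zero]; omega
    rw [h0, winds]
    simp
  | cons a t ih =>
    by_cases hlen : (a :: t).length < n
    · have h0 : (((a :: t).length : Int) - (n : Int) + 1).toNat = 0 := by
        simp only [List.length_cons] at hlen ⊢; omega
      rw [h0, winds, if_pos hlen]
      simp
    · have hM : (((a :: t).length : Int) - (n : Int) + 1).toNat
          = ((t.length : Int) - (n : Int) + 1).toNat + 1 := by
        simp only [List.length_cons] at hlen ⊢; omega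
      rw [hM, List.range_succ_eq_map, List.map_cons, List.map_map]
      have hhead : PySem.List.slice (a :: t) (some ((0 : Nat) : Int))
          (some (((0 : Nat) : Int) + (n : Int))) = (a :: t).take n := by
        rw [show ((((0 : Nat) : Int)) + (n : Int)) = ((n : Nat) : Int) by push_cast; ring]
        rw [PySem.List.slice_natCast]
        simp
      have htailf : ∀ k ∈ List.range (((t.length : Int) - (n : Int) + 1).toNat),
          ((fun (k : Nat) => PySem.List.slice (a :: t) (some ((k : Nat) : Int)) (some (((k : Nat) : Int) + (n : Int)))) ∘ Nat.succ) k
          = (fun (k : Nat) => PySem.List.slice t (some ((k : Nat) : Int)) (some (((k : Nat) : Int) + (n : Int)))) k := by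
        intro k _
        simp only [Function.comp_apply]
        rw [show ((Nat.succ k : Nat) : Int) = (((k + 1 : Nat)) : Int) by push_cast; ring]
        rw [show (((k + 1 : Nat) : Int) + (n : Int)) = (((k + 1 + n : Nat)) : Int) by push_cast; ring,
            show (((k : Nat) : Int) + (n : Int)) = (((k + n : Nat)) : Int) by push_cast; ring]
        rw [PySem.List.slice_natCast, PySem.List.slice_natCast]
        simp only [List.drop_succ_cons]
        congr 1
        omega
      rw [List.map_congr_left htailf, ih, winds, if_neg hlen, hhead]

-- the two window constructions agree for every token list and every n_gram
theorem ngram_core (t : List String) (n_gram : Int) :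
    (pyZipStar ((PySem.List.pyRange 0 n_gram 1).map
        (fun i => PySem.List.slice t (some i) none))).map (fun g => PySem.Str.join " " g)
      = if n_gram ≤ 0 then []
        else (PySem.List.pyRange 0 ((t.length : Int) - n_gram + 1) 1).map
          (fun i => PySem.Str.join " " (PySem.List.slice t (some i) (some (i + n_gram)))) := by
  by_cases hn : n_gram ≤ 0
  · rw [if_pos hn, PySem.List.pyRange_one_eq_nil (by omega), pyZipStar]
    simp
  · rw [if_neg hn]
    set n : Nat := n_gram.toNat with hndef
    have hng : n_gram = (n : Int) := by omega
    have hn1 : 1 ≤ n := by omega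
    have hA : (PySem.List.pyRange 0 n_gram 1).map (fun i => PySem.List.slice t (some i) none)
        = (List.range n).map (fun i => t.drop i) := by
      rw [PySem.List.pyRange_one, List.map_map]
      rw [show (n_gram - 0).toNat = n by omega]
      exact List.map_congr_left (fun k _ => by
        simp only [Function.comp_apply, zero_add]
        exact PySem.List.slice_from_natCast t k)
    have hB : (PySem.List.pyRange 0 ((t.length : Int) - n_gram + 1) 1).map
          (fun i => PySem.Str.join " " (PySem.List.slice t (some i) (some (i + n_gram))))
        = ((List.range (((t.length : Int) - (n : Int) + 1).toNat)).map
            (fun (k : Nat) => PySem.List.slice t (some ((k : Nat) : Int)) (some (((k : Nat) : Int) + (n : Int))))).map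
          (fun g => PySem.Str.join " " g) := by
      rw [PySem.List.pyRange_one, List.map_map, List.map_map, hng]
      rw [show ((t.length : Int) - (n : Int) + 1 - 0).toNat = ((t.length : Int) - (n : Int) + 1).toNat by omega]
      exact List.map_congr_left (fun k _ => by simp)
    rw [hA, hB, pyZipStar_drops t n hn1, slices_windows t n hn1]

-- ===== VERDICT (by name: the statement is the Claim_ definition above) =====
theorem ngram_extractor_spec : Claim_equal_ngram_extractor := by
  intro text n_gram stop_words _
  unfold Spec_ngram_extractor ngram_extractor ngram_extractor_alt
  exact ngram_core _ n_gram
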